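-- pv_equiv track=rewrite | github.com/PolundraNovo/PyEng_Max | exercises/09_functions/task_9_2a.py | generate_trunk_config
-- ===== SOURCE A (Python) =====
-- def generate_trunk_config(intf_vlan_mapping, trunk_template):
--     config_trunk = {}
--     for param in intf_vlan_mapping.items():
--         intf, vlans = param
--         s_vlans = list(map(str, vlans))
--         commands = []
--         for command in trunk_template:
--             if command.startswith("switchport trunk allowed"):
--                 commands.append(command + ' ' + ', '.join(s_vlans))
--             else:
--                 commands.append(command)
--         config_trunk[intf] = commands
--     return config_trunk
-- ===== SOURCE B (Python) =====
-- def generate_trunk_config(intf_vlan_mapping, trunk_template):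
--     # one-time pass: indices of commands that take the allowed-VLAN suffix
--     idxs = [i for i, c in enumerate(trunk_template)
--             if c.startswith("switchport trunk allowed")]
--     config_trunk = {}
--     for intf, vlans in intf_vlan_mapping.items():
--         vlan_str = ', '.join(map(str, vlans))
--         commands = list(trunk_template)
--         for i in idxs:
--             commands[i] = commands[i] + ' ' + vlan_str
--         config_trunk[intf] = commands
--     return config_trunk
-- ===== Notes on version B (the rewrite author's own statement) =====
-- stated objective: alternative
-- what changed: B scans the template once up front to collect the indices of 'switchport trunk allowed' commands, then for each interface copies the template and patches only those positions in place, instead of re-testing startswith on every command for every interface.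
import Mathlib
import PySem

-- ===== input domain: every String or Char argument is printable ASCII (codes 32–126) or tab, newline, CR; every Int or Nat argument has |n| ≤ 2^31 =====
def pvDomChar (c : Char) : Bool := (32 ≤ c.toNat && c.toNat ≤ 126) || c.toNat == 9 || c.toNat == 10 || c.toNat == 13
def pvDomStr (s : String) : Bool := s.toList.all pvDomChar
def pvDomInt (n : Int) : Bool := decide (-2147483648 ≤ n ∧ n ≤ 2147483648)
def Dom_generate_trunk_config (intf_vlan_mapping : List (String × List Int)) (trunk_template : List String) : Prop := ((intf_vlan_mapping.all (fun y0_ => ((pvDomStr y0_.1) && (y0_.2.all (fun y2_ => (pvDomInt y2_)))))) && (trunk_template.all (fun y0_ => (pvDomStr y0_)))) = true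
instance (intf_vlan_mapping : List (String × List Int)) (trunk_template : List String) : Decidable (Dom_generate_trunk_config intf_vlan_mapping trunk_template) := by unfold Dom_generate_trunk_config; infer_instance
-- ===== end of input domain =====

-- B hoists the startswith test out of the per-interface loop: it collects the matching
-- template indices once and patches a copy of the template by position (alternative decomposition, same cost class).

-- ===== PORT A =====
def generate_trunk_config (intf_vlan_mapping : List (String × List Int)) (trunk_template : List String) : List (String × List String) :=
  (intf_vlan_mapping.foldl (fun (config_trunk : PySem.Dict String (List String)) param =>
      let intf := param.1
      let s_vlans := param.2.map PySem.Int.toStr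
      let commands := trunk_template.foldl (fun cmds command =>
        if PySem.Str.startswith command "switchport trunk allowed" then
          cmds ++ [command ++ " " ++ PySem.Str.join ", " s_vlans]
        else
          cmds ++ [command]) []
      config_trunk.insert intf commands) PySem.Dict.empty).items

-- ===== PORT B =====
-- the comprehension '[i for i, c in enumerate(trunk_template) if c.startswith(...)]'
def gtc_idxs : List String → Nat → List Nat
  | [], _ => []
  | c :: t, i =>
    if PySem.Str.startswith c "switchport trunk allowed" then i :: gtc_idxs t (i + 1)
    else gtc_idxs t (i + 1)

def generate_trunk_config_alt (intf_vlan_mapping : List (String × List Int)) (trunk_template : List String) : List (String × List String) :=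
  let idxs := gtc_idxs trunk_template 0
  (intf_vlan_mapping.foldl (fun (config_trunk : PySem.Dict String (List String)) param =>
      let vlan_str := PySem.Str.join ", " (param.2.map PySem.Int.toStr)
      -- 'commands[i] = commands[i] + " " + vlan_str': i from gtc_idxs is always < length, so getD/set are exact
      let commands := idxs.foldl (fun cs i => cs.set i (cs.getD i "" ++ " " ++ vlan_str)) trunk_template
      config_trunk.insert param.1 commands) PySem.Dict.empty).items

-- ===== PRECONDITION & SPEC =====
def Spec_generate_trunk_config (intf_vlan_mapping : List (String × List Int)) (trunk_template : List String) (out : List (String × List String)) : Prop := out = generate_trunk_config_alt intf_vlan_mapping trunk_template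
instance (intf_vlan_mapping : List (String × List Int)) (trunk_template : List String) (out : List (String × List String)) : Decidable (Spec_generate_trunk_config intf_vlan_mapping trunk_template out) := by unfold Spec_generate_trunk_config; infer_instance

-- ===== CLAIM (what is proved, stated in full; the proofs are below) =====
def Claim_equal_generate_trunk_config : Prop := ∀ (intf_vlan_mapping : List (String × List Int)) (trunk_template : List String), Dom_generate_trunk_config intf_vlan_mapping trunk_template → Spec_generate_trunk_config intf_vlan_mapping trunk_template (generate_trunk_config intf_vlan_mapping trunk_template)

-- ===== LEMMAS AND PROOFS =====

-- shifting every index by one skips the head of the list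
theorem gtc_set_shift (v : String) (is : List Nat) (h : String) (t : List String) :
    (is.map (· + 1)).foldl (fun cs i => cs.set i (cs.getD i "" ++ " " ++ v)) (h :: t)
      = h :: is.foldl (fun cs i => cs.set i (cs.getD i "" ++ " " ++ v)) t := by
  induction is generalizing t with
  | nil => rfl
  | cons i is ih =>
    rw [List.map_cons, List.foldl_cons, List.foldl_cons, List.getD_cons_succ, List.set_cons_succ]
    exact ih _

-- gtc_idxs at offset n is the offset-0 list shifted by n
theorem gtc_idxs_shift (tpl : List String) (n : Nat) :
    gtc_idxs tpl n = (gtc_idxs tpl 0).map (· + n) := by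
  induction tpl generalizing n with
  | nil => rfl
  | cons c t ih =>
    have key : ∀ g : List Nat, List.map (· + (n + 1)) g = List.map (· + n) (List.map (· + 1) g) := by
      intro g; rw [List.map_map]; exact List.map_congr_left (fun x _ => by simp only [Function.comp_apply]; omega)
    rw [gtc_idxs, gtc_idxs]
    by_cases hc : PySem.Str.startswith c "switchport trunk allowed" = true
    · rw [if_pos hc, if_pos hc, ih (n + 1), ih 1, key, List.map_cons, List.map_map]
      simp
    · rw [if_neg hc, if_neg hc, ih (n + 1), ih 1, key, List.map_map]

-- patching the template at the collected indices = mapping the conditional append over it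
theorem gtc_inner_eq (v : String) (tpl : List String) :
    (gtc_idxs tpl 0).foldl (fun cs i => cs.set i (cs.getD i "" ++ " " ++ v)) tpl
      = tpl.map (fun c => if PySem.Str.startswith c "switchport trunk allowed" then c ++ " " ++ v else c) := by
  induction tpl with
  | nil => rfl
  | cons c t ih =>
    rw [gtc_idxs, gtc_idxs_shift t 1, List.map_cons]
    by_cases hc : PySem.Str.startswith c "switchport trunk allowed" = true
    · rw [if_pos hc, if_pos hc, List.foldl_cons, List.getD_cons_zero, List.set_cons_zero,
        gtc_set_shift, ih]
    · rw [if_neg hc, if_neg hc, gtc_set_shift, ih]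

-- A's inner loop builds the same map
theorem gtc_A_inner (v : List String) (tpl : List String) (acc : List String) :
    tpl.foldl (fun cmds command =>
        if PySem.Str.startswith command "switchport trunk allowed" then
          cmds ++ [command ++ " " ++ PySem.Str.join ", " v]
        else cmds ++ [command]) acc
      = acc ++ tpl.map (fun c => if PySem.Str.startswith c "switchport trunk allowed" then c ++ " " ++ PySem.Str.join ", " v else c) := by
  induction tpl generalizing acc with
  | nil => simp
  | cons c t ih =>
    rw [List.foldl_cons, List.map_cons]
    by_cases hc : PySem.Str.startswith c "switchport trunk allowed" = true
    · rw [if_pos hc, if_pos hc, ih, List.append_assoc, List.singleton_append]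
    · rw [if_neg hc, if_neg hc, ih, List.append_assoc, List.singleton_append]

-- folding two pointwise-equal step functions gives the same result
theorem gtc_foldl_fun_congr {α β : Type} (f g : β → α → β) (h : ∀ d p, f d p = g d p) :
    ∀ (l : List α) (d : β), l.foldl f d = l.foldl g d := by
  intro l
  induction l with
  | nil => intro d; rfl
  | cons x xs ih => intro d; rw [List.foldl_cons, List.foldl_cons, h]; exact ih _

theorem generate_trunk_config_spec : Claim_equal_generate_trunk_config := by
  intro m tpl _
  show generate_trunk_config m tpl = generate_trunk_config_alt m tpl
  have h := gtc_foldl_fun_congr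
      (fun (config_trunk : PySem.Dict String (List String)) (param : String × List Int) =>
        config_trunk.insert param.1 (tpl.foldl (fun cmds command =>
          if PySem.Str.startswith command "switchport trunk allowed" then
            cmds ++ [command ++ " " ++ PySem.Str.join ", " (param.2.map PySem.Int.toStr)]
          else cmds ++ [command]) []))
      (fun (config_trunk : PySem.Dict String (List String)) (param : String × List Int) =>
        config_trunk.insert param.1 ((gtc_idxs tpl 0).foldl
          (fun cs i => cs.set i (cs.getD i "" ++ " " ++ PySem.Str.join ", " (param.2.map PySem.Int.toStr))) tpl))
      (fun d p => congrArg (d.insert p.1) (by rw [gtc_A_inner, List.nil_append, gtc_inner_eq])) m PySem.Dict.empty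
  exact congrArg PySem.Dict.items h
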